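-- pv_equiv track=rewrite | github.com/NewWwest/masters-project | src/dl/datasets/load.py | _test_train_split
-- ===== SOURCE A (Python) =====
-- def _test_train_split(filenames, test_repos):
--     new_positive_json_files = []
--     test_positive_json_files = []
--     for x in filenames:
--         is_test = False
--         for r in test_repos:
--             if r in x:
--                 is_test = True
--                 break
--         if is_test:
--             test_positive_json_files.append(x)
--         else:
--             new_positive_json_files.append(x)
--
--     return new_positive_json_files, test_positive_json_files
-- ===== SOURCE B (Python) =====
-- def _test_train_split(filenames, test_repos):
--     # Repo-major sweep: each repo filters the indices still unmatched; matched
--     # indices accumulate in a set, then one pass over the enumerated filenames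
--     # rebuilds the two output lists in original order.
--     remaining = range(len(filenames))
--     hits = set()
--     for r in test_repos:
--         matched = [i for i in remaining if r in filenames[i]]
--         if matched:
--             hits.update(matched)
--             remaining = [i for i in remaining if r not in filenames[i]]
--     train = [x for i, x in enumerate(filenames) if i not in hits]
--     test = [x for i, x in enumerate(filenames) if i in hits]
--     return train, test
-- ===== Notes on version B (the rewrite author's own statement) =====
-- stated objective: alternative
-- what changed: Inverts the loop nesting: instead of testing each filename against every repo with a flag-and-break inner loop, B sweeps repo-by-repo over a shrinking pool of still-unmatched filename indices, accumulates matched indices in a set, and rebuilds both output lists in one final pass over the enumeration.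
import Mathlib
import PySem

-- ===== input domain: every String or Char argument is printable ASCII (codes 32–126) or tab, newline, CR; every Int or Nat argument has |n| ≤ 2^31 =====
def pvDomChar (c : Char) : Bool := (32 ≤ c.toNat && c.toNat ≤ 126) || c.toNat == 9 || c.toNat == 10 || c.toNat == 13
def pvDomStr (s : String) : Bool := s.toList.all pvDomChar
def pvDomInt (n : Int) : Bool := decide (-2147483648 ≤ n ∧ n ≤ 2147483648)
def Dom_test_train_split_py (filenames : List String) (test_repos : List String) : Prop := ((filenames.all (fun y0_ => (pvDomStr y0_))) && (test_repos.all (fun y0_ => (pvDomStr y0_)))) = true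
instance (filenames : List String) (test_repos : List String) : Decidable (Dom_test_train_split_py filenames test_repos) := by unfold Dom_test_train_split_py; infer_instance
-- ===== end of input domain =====

-- B inverts the loop nesting: a repo-major sweep over a shrinking pool of still-unmatched
-- filename indices collects matches in a set, then one pass rebuilds both lists (alternative).
-- ===== PORT A =====
-- inner 'for r in test_repos: if r in x: is_test = True; break'
def pvAInner (test_repos : List String) (x : String) : Bool :=
  match test_repos with
  | [] => false
  | r :: rs => if PySem.Str.isIn r x then true else pvAInner rs x

def test_train_split_py (filenames : List String) (test_repos : List String) : List String × List String :=
  (filenames.foldl (fun (acc : List String × List String) x =>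
    let is_test := pvAInner test_repos x
    if is_test then (acc.1, acc.2 ++ [x]) else (acc.1 ++ [x], acc.2)) ([], []))

-- ===== PORT B =====
-- one repo: 'matched = [i for i in remaining if r in filenames[i]]; if matched:
--   hits.update(matched); remaining = [i for i in remaining if r not in filenames[i]]'
def pvBOuterStep (filenames : List String) (st : List Int × PySem.Set Int) (r : String) :
    List Int × PySem.Set Int :=
  let matched := st.1.filter (fun i => PySem.Str.isIn r (PySem.List.pyGetD filenames i ""))
  if matched = [] then st
  else (st.1.filter (fun i => ! PySem.Str.isIn r (PySem.List.pyGetD filenames i "")),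
        PySem.Set.update st.2 matched)

-- 'hits' after the outer loop has run over all repos (remaining starts as range(len(filenames)))
def pvBHits (filenames : List String) (test_repos : List String) : PySem.Set Int :=
  (test_repos.foldl (pvBOuterStep filenames)
    (PySem.List.pyRange 0 filenames.length 1, PySem.Set.empty)).2

def test_train_split_py_alt (filenames : List String) (test_repos : List String) : List String × List String :=
  (((PySem.List.enumerate filenames 0).filter (fun p => ! PySem.Set.contains (pvBHits filenames test_repos) p.1)).map (fun p => p.2),
   ((PySem.List.enumerate filenames 0).filter (fun p => PySem.Set.contains (pvBHits filenames test_repos) p.1)).map (fun p => p.2))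

-- ===== PRECONDITION & SPEC =====
def Spec_test_train_split_py (filenames : List String) (test_repos : List String) (out : List String × List String) : Prop := out = test_train_split_py_alt filenames test_repos
instance (filenames : List String) (test_repos : List String) (out : List String × List String) : Decidable (Spec_test_train_split_py filenames test_repos out) := by unfold Spec_test_train_split_py; infer_instance

-- ===== CLAIM (what is proved, stated in full; the proofs are below) =====
def Claim_equal_test_train_split_py : Prop := ∀ (filenames : List String) (test_repos : List String), Dom_test_train_split_py filenames test_repos → Spec_test_train_split_py filenames test_repos (test_train_split_py filenames test_repos)

-- ===== LEMMAS AND PROOFS =====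
def pvIsTest (test_repos : List String) (x : String) : Bool :=
  test_repos.any (fun r => PySem.Str.isIn r x)

theorem pvAInner_eq_any (test_repos : List String) (x : String) :
    pvAInner test_repos x = pvIsTest test_repos x := by
  induction test_repos with
  | nil => rfl
  | cons r rs ih => simp [pvAInner, pvIsTest, List.any_cons, ih]

theorem pvFold_eq_filter (filenames test_repos : List String) (a b : List String) :
    filenames.foldl (fun (acc : List String × List String) x =>
      let is_test := pvAInner test_repos x
      if is_test then (acc.1, acc.2 ++ [x]) else (acc.1 ++ [x], acc.2)) (a, b)
    = (a ++ filenames.filter (fun x => ! pvIsTest test_repos x),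
       b ++ filenames.filter (fun x => pvIsTest test_repos x)) := by
  induction filenames generalizing a b with
  | nil => simp
  | cons y ys ih =>
      simp only [pvAInner_eq_any, List.foldl_cons, List.filter_cons] at ih ⊢
      by_cases h : pvIsTest test_repos y = true <;> simp [h, ih]

theorem pvMem_foldl_add (l : List Int) (hits : PySem.Set Int) (j : Int) :
    (j ∈ l.foldl (fun h i => PySem.Set.add h i) hits) ↔ j ∈ hits ∨ j ∈ l := by
  induction l generalizing hits with
  | nil => simp
  | cons q qs ih => simp [ih, PySem.Set.mem_add]; tauto

-- one repo step: remaining becomes the unmatched indices, hits gains the matched ones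
theorem pvBStep_fst (filenames : List String) (r : String) (st : List Int × PySem.Set Int) :
    (pvBOuterStep filenames st r).1
    = st.1.filter (fun i => ! PySem.Str.isIn r (PySem.List.pyGetD filenames i "")) := by
  unfold pvBOuterStep
  show (if st.1.filter (fun i => PySem.Str.isIn r (PySem.List.pyGetD filenames i "")) = [] then st
    else (st.1.filter (fun i => ! PySem.Str.isIn r (PySem.List.pyGetD filenames i "")),
          PySem.Set.update st.2 (st.1.filter (fun i => PySem.Str.isIn r (PySem.List.pyGetD filenames i ""))))).1
    = st.1.filter (fun i => ! PySem.Str.isIn r (PySem.List.pyGetD filenames i ""))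
  split_ifs with h
  · exact (List.filter_eq_self.mpr (fun i hi => by
      have := List.filter_eq_nil_iff.mp h i hi
      simpa using this)).symm
  · rfl

theorem pvBStep_snd_mem (filenames : List String) (r : String) (st : List Int × PySem.Set Int)
    (j : Int) :
    (j ∈ (pvBOuterStep filenames st r).2)
    ↔ j ∈ st.2 ∨ (j ∈ st.1 ∧ PySem.Str.isIn r (PySem.List.pyGetD filenames j "") = true) := by
  unfold pvBOuterStep
  show j ∈ (if st.1.filter (fun i => PySem.Str.isIn r (PySem.List.pyGetD filenames i "")) = [] then st
    else (st.1.filter (fun i => ! PySem.Str.isIn r (PySem.List.pyGetD filenames i "")),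
          PySem.Set.update st.2 (st.1.filter (fun i => PySem.Str.isIn r (PySem.List.pyGetD filenames i ""))))).2
    ↔ j ∈ st.2 ∨ (j ∈ st.1 ∧ PySem.Str.isIn r (PySem.List.pyGetD filenames j "") = true)
  by_cases h : st.1.filter (fun i => PySem.Str.isIn r (PySem.List.pyGetD filenames i "")) = []
  · rw [if_pos h]
    constructor
    · exact Or.inl
    · rintro (hj | ⟨hj, hm⟩)
      · exact hj
      · exact absurd hm (by simpa using List.filter_eq_nil_iff.mp h j hj)
  · rw [if_neg h]
    simp only [PySem.Set.update, pvMem_foldl_add, List.mem_filter]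

-- B's outer loop: an index lands in hits iff its filename matches some repo
theorem pvMem_outer (filenames : List String) (rs : List String) (idxs : List Int)
    (hits : PySem.Set Int) (j : Int) :
    (j ∈ (rs.foldl (pvBOuterStep filenames) (idxs, hits)).2)
    ↔ j ∈ hits ∨ (j ∈ idxs ∧ pvIsTest rs (PySem.List.pyGetD filenames j "") = true) := by
  induction rs generalizing idxs hits with
  | nil => simp [pvIsTest]
  | cons r rs' ih =>
      have hstep : rs'.foldl (pvBOuterStep filenames) (pvBOuterStep filenames (idxs, hits) r)
          = rs'.foldl (pvBOuterStep filenames)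
              (idxs.filter (fun i => ! PySem.Str.isIn r (PySem.List.pyGetD filenames i "")),
               (pvBOuterStep filenames (idxs, hits) r).2) := by
        rw [← pvBStep_fst filenames r (idxs, hits)]
      rw [List.foldl_cons, hstep, ih, pvBStep_snd_mem]
      simp only [List.mem_filter, pvIsTest, List.any_cons, Bool.or_eq_true,
        Bool.not_eq_eq_eq_not, Bool.not_true]
      by_cases hm : PySem.Chars.isIn r.toList (PySem.List.pyGetD filenames j "").toList = true <;>
        simp [hm]

-- dropping the indices from a filter by a predicate on the value alone
theorem pvEnumFilterMap (g : String → Bool) (xs : List String) (s : Int) :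
    ((PySem.List.enumerate xs s).filter (fun p => g p.2)).map (fun p => p.2)
    = xs.filter g := by
  induction xs generalizing s with
  | nil => simp [PySem.List.enumerate_nil]
  | cons y ys ih =>
      simp only [PySem.List.enumerate_cons, List.filter_cons]
      by_cases h : g y = true <;> simp [h, ih]

theorem pvHits_char (filenames test_repos : List String)
    (p : Int × String) (hp : p ∈ PySem.List.enumerate filenames 0) :
    PySem.Set.contains (pvBHits filenames test_repos) p.1
    = pvIsTest test_repos p.2 := by
  unfold pvBHits
  rcases (PySem.List.mem_enumerate_iff _ _ _).1 hp with ⟨k, hk, rfl⟩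
  rw [Bool.eq_iff_iff, PySem.Set.contains_iff, pvMem_outer]
  simp only [PySem.Set.empty, List.not_mem_nil, false_or, PySem.List.mem_pyRange_one, zero_add]
  have hg : PySem.List.pyGetD filenames (k : Int) "" = filenames[k] :=
    PySem.List.pyGetD_ofNat filenames k "" hk
  rw [hg]
  constructor
  · rintro ⟨_, h⟩; exact h
  · intro h; exact ⟨⟨by positivity, by exact_mod_cast hk⟩, h⟩

theorem pvAlt_eq (filenames test_repos : List String) :
    test_train_split_py_alt filenames test_repos
    = (filenames.filter (fun x => ! pvIsTest test_repos x),
       filenames.filter (fun x => pvIsTest test_repos x)) := by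
  unfold test_train_split_py_alt
  have h1 := List.filter_congr (l := PySem.List.enumerate filenames 0)
    (fun p hp => by rw [pvHits_char filenames test_repos p hp] :
      ∀ p ∈ PySem.List.enumerate filenames 0,
        (! PySem.Set.contains (pvBHits filenames test_repos) p.1) = (! pvIsTest test_repos p.2))
  have h2 := List.filter_congr (l := PySem.List.enumerate filenames 0)
    (fun p hp => pvHits_char filenames test_repos p hp :
      ∀ p ∈ PySem.List.enumerate filenames 0,
        PySem.Set.contains (pvBHits filenames test_repos) p.1 = pvIsTest test_repos p.2)
  rw [h1, h2, pvEnumFilterMap (fun x => ! pvIsTest test_repos x) filenames 0, pvEnumFilterMap (pvIsTest test_repos) filenames 0]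

-- ===== VERDICT (by name: the statement is the Claim_ definition above) =====
theorem test_train_split_py_spec : Claim_equal_test_train_split_py := by
  intro filenames test_repos _
  unfold Spec_test_train_split_py test_train_split_py
  rw [pvFold_eq_filter, pvAlt_eq]
  simp
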